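-- pv_equiv track=rewrite | github.com/almirgon/LabP1 | Unidade-7/afinidade.py | tem_afinidade
-- ===== SOURCE A (Python) =====
-- def tem_afinidade(l1, l2):
-- 	cont = 0
-- 	for i in l1:
-- 		for x in l2:
-- 			if i == x:
-- 				cont += 1
-- 	if cont >= 3:
-- 		return True
-- 	else:
-- 		return False
-- ===== SOURCE B (Python) =====
-- def tem_afinidade(l1, l2):
--     a = sorted(l1)
--     b = sorted(l2)
--     cont = 0
--     i = j = 0
--     while i < len(a) and j < len(b):
--         if a[i] < b[j]:
--             i += 1
--         elif b[j] < a[i]: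
--             j += 1
--         else:
--             v = a[i]
--             ci = 0
--             while i < len(a) and a[i] == v:
--                 ci += 1
--                 i += 1
--             cj = 0
--             while j < len(b) and b[j] == v:
--                 cj += 1
--                 j += 1
--             cont += ci * cj
--     return cont >= 3
-- ===== Notes on version B (the rewrite author's own statement) =====
-- stated objective: faster
-- what changed: Sorts both lists and counts matching pairs with a two-pointer merge over runs of equal values (adding run-length products), instead of A's nested scan of l2 for every element of l1.
import Mathlib
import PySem

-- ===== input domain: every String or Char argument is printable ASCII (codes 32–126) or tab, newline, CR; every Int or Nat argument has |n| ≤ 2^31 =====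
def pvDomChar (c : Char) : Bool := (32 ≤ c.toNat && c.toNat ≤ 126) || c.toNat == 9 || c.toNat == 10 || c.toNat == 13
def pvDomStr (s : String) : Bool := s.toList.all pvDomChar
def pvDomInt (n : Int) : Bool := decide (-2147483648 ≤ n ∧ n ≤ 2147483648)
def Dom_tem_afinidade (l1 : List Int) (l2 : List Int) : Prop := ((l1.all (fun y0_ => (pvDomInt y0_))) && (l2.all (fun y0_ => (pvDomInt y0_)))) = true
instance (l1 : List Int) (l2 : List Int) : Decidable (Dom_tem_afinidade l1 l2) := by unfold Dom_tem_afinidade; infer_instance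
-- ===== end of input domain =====

-- B sorts both lists and counts matching pairs by a two-pointer merge over runs of
-- equal values (adding run-length products) instead of A's nested scan; objective: faster.

-- ===== PORT A =====
def tem_afinidade (l1 : List Int) (l2 : List Int) : Bool :=
  let cont := l1.foldl (fun c i => l2.foldl (fun c x => if i == x then c + 1 else c) c) (0 : Int)
  if cont ≥ 3 then true else false

-- ===== PORT B =====
-- the inner `while a[i] == v` runs of Source B: leading run length of v plus the remaining suffix
def pvRun (v : Int) : List Int → Int × List Int
  | [] => (0, [])
  | x :: xs =>
    if x == v then
      let (k, r) := pvRun v xs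
      (k + 1, r)
    else (0, x :: xs)

lemma pvRun_length_le (v : Int) (l : List Int) : (pvRun v l).2.length ≤ l.length := by
  induction l with
  | nil => simp [pvRun]
  | cons x xs ih =>
    simp only [pvRun]
    split
    · simpa using Nat.le_succ_of_le ih
    · simp

-- the outer merge `while i < len(a) and j < len(b)` loop of Source B
def pvMergeCount : List Int → List Int → Int
  | [], _ => 0
  | _ :: _, [] => 0
  | x :: xs, y :: ys =>
    if x < y then pvMergeCount xs (y :: ys)
    else if y < x then pvMergeCount (x :: xs) ys
    else
      let ci := (pvRun x (x :: xs)).1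
      let xr := (pvRun x (x :: xs)).2
      let cj := (pvRun x (y :: ys)).1
      let yr := (pvRun x (y :: ys)).2
      ci * cj + pvMergeCount xr yr
termination_by a b => a.length + b.length
decreasing_by
  · simp
  · simp
  · have h1 : (pvRun x (x :: xs)).2.length ≤ xs.length := by
      simpa [pvRun] using pvRun_length_le x xs
    have h2 : (pvRun x (y :: ys)).2.length ≤ (y :: ys).length := pvRun_length_le x (y :: ys)
    simp only [List.length_cons] at h2 ⊢
    omega

def tem_afinidade_alt (l1 : List Int) (l2 : List Int) : Bool :=
  let a := PySem.List.sorted l1 (fun x => x) false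
  let b := PySem.List.sorted l2 (fun x => x) false
  decide (pvMergeCount a b ≥ 3)

-- ===== PRECONDITION & SPEC =====
def Spec_tem_afinidade (l1 : List Int) (l2 : List Int) (out : Bool) : Prop := out = tem_afinidade_alt l1 l2
instance (l1 : List Int) (l2 : List Int) (out : Bool) : Decidable (Spec_tem_afinidade l1 l2 out) := by unfold Spec_tem_afinidade; infer_instance

-- ===== CLAIM (what is proved, stated in full; the proofs are below) =====
def Claim_equal_tem_afinidade : Prop := ∀ (l1 : List Int) (l2 : List Int), Dom_tem_afinidade l1 l2 → Spec_tem_afinidade l1 l2 (tem_afinidade l1 l2)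

-- ===== LEMMAS AND PROOFS =====

-- total pair count as a sum of per-element counts
def pvSumCount (l1 l2 : List Int) : Int := (l1.map (fun i => ((l2.count i : Nat) : Int))).sum

lemma inner_count (i : Int) (l2 : List Int) (c : Int) :
    l2.foldl (fun c x => if i == x then c + 1 else c) c = c + l2.count i := by
  induction l2 generalizing c with
  | nil => simp
  | cons h t ih =>
    simp only [List.foldl_cons, List.count_cons, ih]
    by_cases hx : i = h
    · simp [hx]; ring
    · simp [hx, Ne.symm hx]

lemma a_cont_eq (l1 l2 : List Int) (c : Int) :
    l1.foldl (fun c i => l2.foldl (fun c x => if i == x then c + 1 else c) c) c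
      = c + pvSumCount l1 l2 := by
  induction l1 generalizing c with
  | nil => simp [pvSumCount]
  | cons h t ih =>
    rw [List.foldl_cons, inner_count, ih]
    simp [pvSumCount]
    ring

-- pvRun computes leading-run length and the suffix after it
lemma pvRun_eq (v : Int) (l : List Int) :
    pvRun v l = (((l.takeWhile (fun x => x == v)).length : Int), l.dropWhile (fun x => x == v)) := by
  induction l with
  | nil => simp [pvRun]
  | cons x xs ih =>
    by_cases h : x = v
    · simp [pvRun, h, ih]
    · simp [pvRun, h]

lemma takeWhile_eq_replicate (v : Int) (l : List Int) :
    l.takeWhile (fun x => x == v) = List.replicate (l.takeWhile (fun x => x == v)).length v := by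
  apply List.eq_replicate_of_mem
  intro b hb
  have := List.mem_takeWhile_imp hb
  simpa using this

-- on a sorted list whose elements are all ≥ v, the leading run of v is all occurrences of v
lemma run_count (v : Int) (l : List Int) (hs : l.Pairwise (· ≤ ·)) (hge : ∀ a ∈ l, v ≤ a) :
    (l.takeWhile (fun x => x == v)).length = l.count v ∧
      ∀ a ∈ l.dropWhile (fun x => x == v), v < a := by
  induction l with
  | nil => simp
  | cons x xs ih =>
    rcases List.pairwise_cons.mp hs with ⟨hx, hxs⟩
    by_cases h : x = v
    · subst h
      have hge' : ∀ a ∈ xs, x ≤ a := hx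
      obtain ⟨h1, h2⟩ := ih hxs hge'
      constructor
      · simp [h1]
      · intro a haa
        apply h2
        rw [List.dropWhile_cons] at haa
        simpa using haa
    · have hvx : v < x := lt_of_le_of_ne (hge x (by simp)) (Ne.symm h)
      constructor
      · have : (x :: xs).count v = 0 := by
          rw [List.count_eq_zero]
          intro hmem
          rcases List.mem_cons.mp hmem with h' | h'
          · exact h h'.symm
          · exact absurd (hx v h') (not_le.mpr hvx)
        simp [h, this]
      · intro a ha
        rw [List.dropWhile_cons] at ha
        have ha' : a ∈ x :: xs := by simpa [h] using ha
        rcases List.mem_cons.mp ha' with h' | h'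
        · exact h' ▸ hvx
        · exact lt_of_lt_of_le hvx (hx a h')

-- correctness of the merge on sorted lists
lemma mergeCount_eq (a b : List Int) (ha : a.Pairwise (· ≤ ·)) (hb : b.Pairwise (· ≤ ·)) :
    pvMergeCount a b = pvSumCount a b := by
  fun_induction pvMergeCount a b with
  | case1 b => simp [pvSumCount]
  | case2 x xs => simp [pvSumCount]
  | case3 x xs y ys hxy ih =>
    rcases List.pairwise_cons.mp ha with ⟨hx, has⟩
    rcases List.pairwise_cons.mp hb with ⟨hy, hbs⟩
    have hx0 : (y :: ys).count x = 0 := by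
      rw [List.count_eq_zero]
      intro hmem
      rcases List.mem_cons.mp hmem with h' | h'
      · exact absurd (h' ▸ hxy) (lt_irrefl y)
      · exact absurd (lt_of_lt_of_le hxy (hy x h')) (lt_irrefl x)
    simp [pvSumCount, hx0, ih has hb, pvSumCount]
  | case4 x xs y ys hxy hyx ih =>
    rcases List.pairwise_cons.mp hb with ⟨hy, hbs⟩
    have hyx' : y < x := hyx
    have key : ∀ i ∈ x :: xs, (y :: ys).count i = ys.count i := by
      intro i hi
      have hxi : x ≤ i := by
        rcases List.mem_cons.mp hi with h' | h'
        · exact h' ▸ le_refl x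
        · exact (List.pairwise_cons.mp ha).1 i h'
      have : y ≠ i := ne_of_lt (lt_of_lt_of_le hyx' hxi)
      simp [this]
    simp only [pvSumCount] at *
    rw [List.map_congr_left (fun i hi => by rw [key i hi])]
    exact ih ha hbs
  | case5 x xs y ys hxy hyx ci xr cj yr ihm =>
    have hyx' : y = x := le_antisymm (not_lt.mp hxy) (not_lt.mp hyx)
    subst hyx'
    -- characterise the two runs
    rcases run_count y (y :: xs) ha (by
      intro a haa
      rcases List.mem_cons.mp haa with h' | h'
      · exact h' ▸ le_refl y
      · exact (List.pairwise_cons.mp ha).1 a h') with ⟨hca, hgta⟩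
    rcases run_count y (y :: ys) hb (by
      intro a haa
      rcases List.mem_cons.mp haa with h' | h'
      · exact h' ▸ le_refl y
      · exact (List.pairwise_cons.mp hb).1 a h') with ⟨hcb, hgtb⟩
    show (pvRun y (y :: xs)).1 * (pvRun y (y :: ys)).1
        + pvMergeCount (pvRun y (y :: xs)).2 (pvRun y (y :: ys)).2
        = pvSumCount (y :: xs) (y :: ys)
    have ih : ((y :: xs).dropWhile (fun x => x == y)).Pairwise (· ≤ ·) →
        ((y :: ys).dropWhile (fun x => x == y)).Pairwise (· ≤ ·) →
        pvMergeCount ((y :: xs).dropWhile (fun x => x == y)) ((y :: ys).dropWhile (fun x => x == y))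
          = pvSumCount ((y :: xs).dropWhile (fun x => x == y)) ((y :: ys).dropWhile (fun x => x == y)) := by
      rw [show (y :: xs).dropWhile (fun x => x == y) = (pvRun y (y :: xs)).2 by rw [pvRun_eq],
          show (y :: ys).dropWhile (fun x => x == y) = (pvRun y (y :: ys)).2 by rw [pvRun_eq]]
      exact ihm
    rw [pvRun_eq, pvRun_eq]
    dsimp only
    set ta := (y :: xs).takeWhile (fun x => x == y) with hta
    set da := (y :: xs).dropWhile (fun x => x == y) with hda
    set tb := (y :: ys).takeWhile (fun x => x == y) with htb
    set db := (y :: ys).dropWhile (fun x => x == y) with hdb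
    have hsa : da.Pairwise (· ≤ ·) := List.Pairwise.sublist (List.dropWhile_sublist _) ha
    have hsb : db.Pairwise (· ≤ ·) := List.Pairwise.sublist (List.dropWhile_sublist _) hb
    rw [ih hsa hsb]
    -- decompose the sum over a = ta ++ da
    have hsplit : y :: xs = ta ++ da := (List.takeWhile_append_dropWhile).symm
    have hrep : ta = List.replicate ta.length y := takeWhile_eq_replicate y (y :: xs)
    have hcount_da : ∀ i ∈ da, (y :: ys).count i = db.count i := by
      intro i hi
      have hyi : y < i := hgta i hi
      have hsplitb : y :: ys = tb ++ db := (List.takeWhile_append_dropWhile).symm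
      have hrepb : tb = List.replicate tb.length y := takeWhile_eq_replicate y (y :: ys)
      rw [hsplitb, List.count_append, hrepb, List.count_replicate]
      simp [Ne.symm (ne_of_gt hyi)]
    calc ((ta.length : Int)) * (tb.length : Int) + pvSumCount da db
        = (ta.map (fun i => (((y :: ys).count i : Nat) : Int))).sum
          + (da.map (fun i => (((y :: ys).count i : Nat) : Int))).sum := by
          congr 1
          · rw [hrep]
            simp [List.map_replicate, List.sum_replicate, hcb]
          · unfold pvSumCount
            refine congrArg List.sum ?_
            exact (List.map_congr_left fun i hi => by rw [hcount_da i hi]).symm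
      _ = pvSumCount (y :: xs) (y :: ys) := by
            unfold pvSumCount
            rw [hsplit, List.map_append, List.sum_append]

-- the pair-count sum is invariant under sorting both lists
lemma sumCount_sorted (l1 l2 : List Int) :
    pvSumCount (PySem.List.sorted l1 (fun x => x) false) (PySem.List.sorted l2 (fun x => x) false)
      = pvSumCount l1 l2 := by
  unfold pvSumCount
  have h1 : (PySem.List.sorted l1 (fun x => x) false).Perm l1 := PySem.List.sorted_perm _ _ _
  have h2 : (PySem.List.sorted l2 (fun x => x) false).Perm l2 := PySem.List.sorted_perm _ _ _
  have hcount : ∀ i : Int, (PySem.List.sorted l2 (fun x => x) false).count i = l2.count i :=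
    fun i => h2.count_eq i
  rw [List.map_congr_left (fun i _ => by rw [hcount i])]
  exact (h1.map _).sum_eq

-- ===== VERDICT (by name: the statement is the Claim_ definition above) =====
theorem tem_afinidade_spec : Claim_equal_tem_afinidade := by
  intro l1 l2 _
  unfold Spec_tem_afinidade
  show tem_afinidade l1 l2 = tem_afinidade_alt l1 l2
  have hA : tem_afinidade l1 l2 = decide (pvSumCount l1 l2 ≥ 3) := by
    unfold tem_afinidade
    show (if l1.foldl (fun c i => l2.foldl (fun c x => if i == x then c + 1 else c) c) (0 : Int) ≥ 3
        then true else false) = _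
    rw [a_cont_eq]
    split_ifs with h <;> simp_all
  have hB : tem_afinidade_alt l1 l2 = decide (pvSumCount l1 l2 ≥ 3) := by
    unfold tem_afinidade_alt
    show decide (pvMergeCount (PySem.List.sorted l1 (fun x => x) false)
        (PySem.List.sorted l2 (fun x => x) false) ≥ 3) = _
    rw [mergeCount_eq _ _ (by simpa using PySem.List.sorted_pairwise l1 (fun x => x))
          (by simpa using PySem.List.sorted_pairwise l2 (fun x => x)),
        sumCount_sorted]
  rw [hA, hB]
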